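-- pv_equiv track=rewrite | github.com/jdefrancesco/Dirty430 | DirtySMS.py | semi_octet_swap
-- ===== SOURCE A (Python) =====
-- def semi_octet_swap(hex_digits):
--     """Swap semi-octets in a hex string like '123456' -> '214365'."""
--
--     out = []
--     for i in range(0, len(hex_digits), 2):
--         if i + 1 < len(hex_digits):
--             out.append(hex_digits[i + 1])
--             out.append(hex_digits[i])
--         else:
--             out.append('F')
--             out.append(hex_digits[i])
--     return ''.join(out)
-- ===== SOURCE B (Python) =====
-- def semi_octet_swap(hex_digits):
--     """Swap semi-octets in a hex string like '123456' -> '214365'."""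
--     s = hex_digits if len(hex_digits) % 2 == 0 else hex_digits + 'F'
--     return ''.join(a + b for a, b in zip(s[1::2], s[0::2]))
-- ===== Notes on version B (the rewrite author's own statement) =====
-- stated objective: idiomatic
-- what changed: B pads the string to even length up front ('F' if odd) and then interleaves the two strided slices s[1::2] and s[0::2] via zip, replacing A's index loop with an in-loop odd-tail branch.
import Mathlib
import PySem

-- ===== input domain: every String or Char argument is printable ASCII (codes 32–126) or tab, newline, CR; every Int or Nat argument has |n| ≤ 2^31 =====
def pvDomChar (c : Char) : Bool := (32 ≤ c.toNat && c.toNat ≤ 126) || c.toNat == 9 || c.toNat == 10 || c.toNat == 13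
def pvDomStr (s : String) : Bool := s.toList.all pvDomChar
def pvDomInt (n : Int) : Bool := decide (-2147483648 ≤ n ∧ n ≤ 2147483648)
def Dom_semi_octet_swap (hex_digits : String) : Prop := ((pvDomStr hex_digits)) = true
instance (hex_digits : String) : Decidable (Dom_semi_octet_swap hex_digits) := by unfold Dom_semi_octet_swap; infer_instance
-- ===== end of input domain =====

-- B pads to even length first and interleaves the two strided slices s[1::2] and s[0::2]; same result, more idiomatic (no in-loop branch).

-- ===== PORT A =====
-- every index the loop visits is in range, so the ' ' default of pyGetD is never used
def semi_octet_swap (hex_digits : String) : String :=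
  let cs := hex_digits.toList
  let out : List Char :=
    (PySem.List.pyRange 0 (cs.length : Int) 2).foldl
      (fun out i =>
        if i + 1 < (cs.length : Int) then
          (out ++ [PySem.List.pyGetD cs (i + 1) ' ']) ++ [PySem.List.pyGetD cs i ' ']
        else
          (out ++ ['F']) ++ [PySem.List.pyGetD cs i ' ']) []
  String.ofList out

-- ===== PORT B =====
-- slice? with step 2 is always `some`, so the [] default of getD is never used
def semi_octet_swap_alt (hex_digits : String) : String :=
  let cs := hex_digits.toList
  let s := if cs.length % 2 == 0 then cs else cs ++ ['F']
  let odds := (PySem.List.slice? s (some 1) none 2).getD []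
  let evens := (PySem.List.slice? s (some 0) none 2).getD []
  String.ofList ((odds.zip evens).flatMap (fun p => [p.1, p.2]))

-- ===== PRECONDITION & SPEC =====
def Spec_semi_octet_swap (hex_digits : String) (out : String) : Prop := out = semi_octet_swap_alt hex_digits
instance (hex_digits : String) (out : String) : Decidable (Spec_semi_octet_swap hex_digits out) := by unfold Spec_semi_octet_swap; infer_instance

-- ===== CLAIM (what is proved, stated in full; the proofs are below) =====
def Claim_equal_semi_octet_swap : Prop := ∀ (hex_digits : String), Dom_semi_octet_swap hex_digits → Spec_semi_octet_swap hex_digits (semi_octet_swap hex_digits)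

-- ===== LEMMAS AND PROOFS =====

-- reference semantics of A's loop
def swp : List Char → List Char
  | [] => []
  | [a] => ['F', a]
  | a :: b :: t => b :: a :: swp t

-- reference semantics of B's zip-interleave (callers only use it on even-length lists)
def pairSwap : List Char → List Char
  | [] => []
  | [_] => []
  | a :: b :: t => b :: a :: pairSwap t

def bodyA (cs : List Char) (out : List Char) (i : Int) : List Char :=
  if i + 1 < (cs.length : Int) then
    (out ++ [PySem.List.pyGetD cs (i + 1) ' ']) ++ [PySem.List.pyGetD cs i ' ']
  else
    (out ++ ['F']) ++ [PySem.List.pyGetD cs i ' ']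

theorem pyRange_two_nil (a b : Int) (h : b ≤ a) : PySem.List.pyRange a b 2 = [] := by
  rw [PySem.List.pyRange_of_pos a b (by norm_num)]
  simp [show ¬ a < b by omega]

theorem pyRange_two_cons (a b : Int) (h : a < b) : PySem.List.pyRange a b 2 = a :: PySem.List.pyRange (a + 2) b 2 := by
  rw [PySem.List.pyRange_of_pos a b (by norm_num), PySem.List.pyRange_of_pos (a + 2) b (by norm_num)]
  by_cases h2 : a + 2 < b
  · rw [if_pos h, if_pos h2,
      show ((b - a + 2 - 1) / 2).toNat = ((b - (a + 2) + 2 - 1) / 2).toNat + 1 by omega,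
      List.range_succ_eq_map]
    simp only [List.map_cons, List.map_map, Nat.cast_zero, mul_zero, add_zero]
    congr 1
    apply List.map_congr_left; intro k _; simp [Function.comp]; ring
  · rw [if_pos h, if_neg h2,
      show ((b - a + 2 - 1) / 2).toNat = 1 by omega]
    simp

theorem lemA (cs : List Char) : ∀ (d : List Char) (a : Nat), cs.drop (2 * a) = d → ∀ acc,
    (PySem.List.pyRange ((2 * a : Nat) : Int) (cs.length : Int) 2).foldl (bodyA cs) acc = acc ++ swp d := by
  intro d
  induction d using swp.induct with
  | case1 =>
    intro a hd acc
    have hlen : cs.length ≤ 2 * a := by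
      have := congrArg List.length hd; simp at this; omega
    rw [pyRange_two_nil _ _ (by exact_mod_cast hlen)]
    simp [swp]
  | case2 x =>
    intro a hd acc
    have hlen : cs.length = 2 * a + 1 := by
      have := congrArg List.length hd; simp at this; omega
    have hx : cs[2 * a]? = some x := by
      have : (cs.drop (2 * a)).head? = some x := by rw [hd]; rfl
      simpa [List.head?_drop] using this
    rw [pyRange_two_cons _ _ (by push_cast; omega)]
    rw [pyRange_two_nil _ _ (by push_cast [hlen]; omega)]
    simp only [List.foldl_cons, List.foldl_nil, bodyA]
    rw [if_neg (by push_cast [hlen]; omega)]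
    rw [show PySem.List.pyGetD cs ((2 * a : Nat) : Int) ' ' = x by
      rw [PySem.List.pyGetD_natCast]; simp [List.getD, hx]]
    simp [swp]
  | case3 x y t ih =>
    intro a hd acc
    have hlen : 2 * a + 2 ≤ cs.length := by
      have := congrArg List.length hd; simp at this; omega
    have hx : cs[2 * a]? = some x := by
      have : (cs.drop (2 * a)).head? = some x := by rw [hd]; rfl
      simpa [List.head?_drop] using this
    have hy : cs[2 * a + 1]? = some y := by
      have : (cs.drop (2 * a + 1)).head? = some y := by
        rw [show 2 * a + 1 = 2 * a + 1 from rfl, ← List.drop_drop, hd]; rfl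
      simpa [List.head?_drop] using this
    rw [pyRange_two_cons _ _ (by exact_mod_cast (by omega : (2 * a : Int) < (cs.length : Int)))]
    simp only [List.foldl_cons, bodyA]
    rw [if_pos (by push_cast; omega)]
    rw [show ((2 * a : Nat) : Int) + 1 = ((2 * a + 1 : Nat) : Int) by push_cast; ring]
    rw [PySem.List.pyGetD_natCast, PySem.List.pyGetD_natCast]
    rw [show ((2 * a : Nat) : Int) + 2 = ((2 * (a + 1) : Nat) : Int) by push_cast; ring]
    rw [ih (a + 1) (by rw [show 2 * (a + 1) = 2 * a + 2 from rfl, ← List.drop_drop, hd]; rfl)]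
    simp [swp, List.getD, hx, hy]

def oddsF (s : List Char) : List Char := (PySem.List.slice? s (some 1) none 2).getD []
def evensF (s : List Char) : List Char := (PySem.List.slice? s (some 0) none 2).getD []

theorem oddsF_nil : oddsF [] = [] := by decide
theorem evensF_nil : evensF [] = [] := by decide
theorem oddsF_single (a : Char) : oddsF [a] = [] := by
  simp [oddsF, PySem.List.slice?, PySem.List.sliceIndices]
theorem evensF_single (a : Char) : evensF [a] = [a] := by
  simp [evensF, PySem.List.slice?, PySem.List.sliceIndices, List.range_succ]


theorem oddsF_cons_cons (a b : Char) (t : List Char) : oddsF (a :: b :: t) = b :: oddsF t := by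
  simp only [oddsF, PySem.List.slice?, PySem.List.sliceIndices]
  norm_num
  rw [show (((t.length:Int) + 1 + 1 - min 1 ((t.length:Int) + 1 + 1) + 2 - 1) / 2).toNat = t.length / 2 + 1 by omega]
  rw [show (if 1 < t.length then (((t.length:Int) - min 1 ((t.length:Int)) + 2 - 1) / 2).toNat else 0) = t.length / 2 by split_ifs <;> omega]
  rw [List.range_succ_eq_map, List.filterMap_cons, List.filterMap_map]
  rw [show ((min 1 ((t.length:Int) + 1 + 1) + 2 * ((0:Nat):Int)).toNat) = 1 by omega]
  simp only [List.getElem?_cons_succ, List.getElem?_cons_zero]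
  refine congrArg (b :: ·) (List.filterMap_congr ?_)
  intro k hk
  simp only [Function.comp]
  rw [show ((min 1 ((t.length:Int) + 1 + 1) + 2 * ((k+1:Nat):Int)).toNat) = 2*k+3 by omega]
  rw [show ((min 1 ((t.length:Int)) + 2 * ((k:Nat):Int)).toNat) = 2*k+1 by
    simp at hk; omega]
  simp [List.getElem?_cons_succ]

theorem evensF_cons_cons (a b : Char) (t : List Char) : evensF (a :: b :: t) = a :: evensF t := by
  simp only [evensF, PySem.List.slice?, PySem.List.sliceIndices]
  norm_num
  rw [show (if (0:Int) ≤ (t.length:Int) + 1 then (((t.length:Int) + 1 + 1 - min 0 ((t.length:Int) + 1 + 1) + 2 - 1) / 2).toNat else 0) = (t.length + 1) / 2 + 1 by split_ifs <;> omega]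
  rw [show (if 0 < t.length then (((t.length:Int) + 2 - 1) / 2).toNat else 0) = (t.length + 1) / 2 by split_ifs <;> omega]
  rw [List.range_succ_eq_map, List.filterMap_cons, List.filterMap_map]
  rw [show ((min 0 ((t.length:Int) + 1 + 1) + 2 * ((0:Nat):Int)).toNat) = 0 by omega]
  simp only [List.getElem?_cons_zero]
  refine congrArg (a :: ·) (List.filterMap_congr ?_)
  intro k hk
  simp only [Function.comp]
  rw [show ((min 0 ((t.length:Int) + 1 + 1) + 2 * ((k+1:Nat):Int)).toNat) = 2*k+2 by omega]
  rw [show ((2 * ((k:Nat):Int)).toNat) = 2*k by omega]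
  simp [List.getElem?_cons_succ]

theorem lemA0 (cs : List Char) (acc : List Char) :
    (PySem.List.pyRange 0 (cs.length : Int) 2).foldl (bodyA cs) acc = acc ++ swp cs := by
  have h := lemA cs cs 0 (by simp) acc
  simpa using h

theorem lemB (s : List Char) : ((oddsF s).zip (evensF s)).flatMap (fun p => [p.1, p.2]) = pairSwap s := by
  induction s using pairSwap.induct with
  | case1 => simp [oddsF_nil, evensF_nil, pairSwap]
  | case2 a => simp [oddsF_single, evensF_single, pairSwap]
  | case3 a b t ih => simp [oddsF_cons_cons, evensF_cons_cons, pairSwap, ih]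

theorem swp_eq_pairSwap_pad (cs : List Char) :
    swp cs = pairSwap (if cs.length % 2 == 0 then cs else cs ++ ['F']) := by
  induction cs using swp.induct with
  | case1 => decide
  | case2 a => simp [swp, pairSwap]
  | case3 a b t ih =>
    have hpar : ((a :: b :: t).length % 2 == 0) = (t.length % 2 == 0) := by
      simp [List.length_cons]; omega
    rw [hpar]
    by_cases h : t.length % 2 == 0
    · rw [if_pos h] at ih ⊢; simp only [swp, pairSwap, ih]
    · rw [if_neg h] at ih ⊢; simp only [List.cons_append, swp, pairSwap, ih]

-- ===== VERDICT (by name: the statement is the Claim_ definition above) =====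
theorem semi_octet_swap_spec : Claim_equal_semi_octet_swap := by
  intro s _
  show _ = _
  unfold semi_octet_swap semi_octet_swap_alt
  simp only []
  rw [show (fun (out : List Char) (i : Int) =>
        if i + 1 < ((s.toList.length : Int)) then
          (out ++ [PySem.List.pyGetD s.toList (i + 1) ' ']) ++ [PySem.List.pyGetD s.toList i ' ']
        else
          (out ++ ['F']) ++ [PySem.List.pyGetD s.toList i ' ']) = bodyA s.toList from rfl]
  rw [lemA0]
  rw [show ∀ s' : List Char, (PySem.List.slice? s' (some 1) none 2).getD [] = oddsF s' from fun _ => rfl,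
      show ∀ s' : List Char, (PySem.List.slice? s' (some 0) none 2).getD [] = evensF s' from fun _ => rfl]
  rw [lemB, ← swp_eq_pairSwap_pad]
  simp
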